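-- pv_equiv track=rewrite | github.com/DesignSafe-CI/dapi | dapi/launcher.py | _expand_commands
-- ===== SOURCE A (Python) =====
-- from itertools import product
-- from typing import Any, List, Mapping, Sequence, Union
--
-- def _validate_sweep(sweep: Mapping[str, Sequence[Any]]) -> None:
--     """Validate sweep values are non-empty, non-string sequences."""
--     for k, vals in sweep.items():
--         if not isinstance(vals, Sequence) or isinstance(vals, (str, bytes)):
--             raise TypeError(f"sweep[{k!r}] must be a non-string sequence of values.")
--         if len(vals) == 0:
--             raise ValueError(f"sweep[{k!r}] is empty; provide at least one value.")
--
-- def _expand_commands(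
--     command: str,
--     sweep: Mapping[str, Sequence[Any]],
--     placeholder_style: str,
-- ) -> List[str]:
--     """Expand a command template into all parameter combinations."""
--     if not sweep:
--         return [command]
--
--     _validate_sweep(sweep)
--
--     if placeholder_style not in ("token", "braces"):
--         raise ValueError("placeholder_style must be 'token' or 'braces'.")
--
--     keys = list(sweep.keys())
--     commands: List[str] = []
--     for combo in product(*[sweep[k] for k in keys]):
--         cmd = command
--         for k, v in zip(keys, combo):
--             if placeholder_style == "token":
--                 cmd = cmd.replace(k, str(v))
--             else:
--                 cmd = cmd.replace("{" + k + "}", str(v))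
--         commands.append(cmd)
--
--     return commands
-- ===== SOURCE B (Python) =====
-- from typing import Any, List, Mapping, Sequence
--
-- def _validate_sweep(sweep: Mapping[str, Sequence[Any]]) -> None:
--     """Validate sweep values are non-empty, non-string sequences."""
--     for k, vals in sweep.items():
--         if not isinstance(vals, Sequence) or isinstance(vals, (str, bytes)):
--             raise TypeError(f"sweep[{k!r}] must be a non-string sequence of values.")
--         if len(vals) == 0:
--             raise ValueError(f"sweep[{k!r}] is empty; provide at least one value.")
--
-- def _expand_commands(
--     command: str,
--     sweep: Mapping[str, Sequence[Any]],
--     placeholder_style: str,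
-- ) -> List[str]:
--     """Expand a command template into all parameter combinations (recursive expansion)."""
--     if not sweep:
--         return [command]
--
--     _validate_sweep(sweep)
--
--     if placeholder_style not in ("token", "braces"):
--         raise ValueError("placeholder_style must be 'token' or 'braces'.")
--
--     items = list(sweep.items())
--
--     def go(cmd: str, i: int) -> List[str]:
--         if i == len(items):
--             return [cmd]
--         k, vals = items[i]
--         out: List[str] = []
--         for v in vals:
--             pat = k if placeholder_style == "token" else "{" + k + "}"
--             out.extend(go(cmd.replace(pat, str(v)), i + 1))
--         return out
--
--     return go(command, 0)
-- ===== Notes on version B (the rewrite author's own statement) =====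
-- stated objective: alternative
-- what changed: Replaces itertools.product over all value lists followed by a per-combo zip+replace loop with a direct recursive expansion over the key list that substitutes one key per level and recurses on the already-substituted string, so no combination tuples are ever materialised.
import Mathlib
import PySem

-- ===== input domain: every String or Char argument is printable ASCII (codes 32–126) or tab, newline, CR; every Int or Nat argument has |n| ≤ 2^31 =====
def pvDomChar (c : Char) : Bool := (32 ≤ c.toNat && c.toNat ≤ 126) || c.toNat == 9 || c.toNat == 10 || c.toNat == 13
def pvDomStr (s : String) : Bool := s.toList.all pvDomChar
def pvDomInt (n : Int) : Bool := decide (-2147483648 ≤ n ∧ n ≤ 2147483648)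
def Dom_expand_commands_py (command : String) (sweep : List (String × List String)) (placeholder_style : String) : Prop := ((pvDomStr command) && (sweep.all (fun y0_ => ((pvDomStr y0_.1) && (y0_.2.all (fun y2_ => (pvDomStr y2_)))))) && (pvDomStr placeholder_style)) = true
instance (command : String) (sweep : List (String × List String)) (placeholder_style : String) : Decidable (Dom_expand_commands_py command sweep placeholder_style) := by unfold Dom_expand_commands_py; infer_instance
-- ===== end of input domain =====

-- B replaces the itertools.product + zip-replace loop of A with a direct recursive
-- expansion over the key list (one substitution per level); alternative decomposition,
-- same cost.


-- ===== PORT A =====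
-- one `replace` step: 'token' style replaces the key itself, otherwise "{key}"
def pvRepl (placeholder_style cmd k v : String) : String :=
  if placeholder_style = "token" then PySem.Str.replace cmd k v
  else PySem.Str.replace cmd ("{" ++ k ++ "}") v

-- itertools.product over a list of value lists (first list varies slowest)
def pvProduct : List (List String) → List (List String)
  | [] => [[]]
  | l :: ls => l.flatMap (fun v => (pvProduct ls).map (fun c => v :: c))

def expand_commands_py (command : String) (sweep : List (String × List String)) (placeholder_style : String) : List String :=
  if sweep = [] then [command]
  else
    (pvProduct (sweep.map (·.2))).map (fun combo =>
      (((sweep.map (·.1)).zip combo)).foldl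
        (fun cmd kv => pvRepl placeholder_style cmd kv.1 kv.2) command)

-- ===== PORT B =====
-- recursive expansion: substitute the first key's values, recurse on the rest
def pvGo (placeholder_style : String) (cmd : String) : List (String × List String) → List String
  | [] => [cmd]
  | (k, vs) :: rest =>
      vs.flatMap (fun v => pvGo placeholder_style (pvRepl placeholder_style cmd k v) rest)

def expand_commands_py_alt (command : String) (sweep : List (String × List String)) (placeholder_style : String) : List String :=
  if sweep = [] then [command]
  else pvGo placeholder_style command sweep

-- ===== PRECONDITION & SPEC =====
-- Pre_ excludes exactly the inputs on which Python A raises: with a non-empty sweep,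
-- an empty value list (ValueError from _validate_sweep) or a placeholder_style other
-- than "token"/"braces" (ValueError).
def Pre_expand_commands_py (command : String) (sweep : List (String × List String)) (placeholder_style : String) : Prop :=
  sweep = [] ∨ ((∀ p ∈ sweep, p.2 ≠ []) ∧ (placeholder_style = "token" ∨ placeholder_style = "braces"))
instance (command : String) (sweep : List (String × List String)) (placeholder_style : String) : Decidable (Pre_expand_commands_py command sweep placeholder_style) := by unfold Pre_expand_commands_py; infer_instance

def pvWitness_expand_commands_py : String × (List (String × List String)) × String :=
  ("run a b", [("a", ["1", "2"]), ("b", ["x"])], "token")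

def Spec_expand_commands_py (command : String) (sweep : List (String × List String)) (placeholder_style : String) (out : List String) : Prop := out = expand_commands_py_alt command sweep placeholder_style
instance (command : String) (sweep : List (String × List String)) (placeholder_style : String) (out : List String) : Decidable (Spec_expand_commands_py command sweep placeholder_style out) := by unfold Spec_expand_commands_py; infer_instance

-- ===== CLAIM (what is proved, stated in full; the proofs are below) =====
def Claim_equal_expand_commands_py : Prop := ∀ (command : String) (sweep : List (String × List String)) (placeholder_style : String), Dom_expand_commands_py command sweep placeholder_style → Pre_expand_commands_py command sweep placeholder_style → Spec_expand_commands_py command sweep placeholder_style (expand_commands_py command sweep placeholder_style)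

-- ===== LEMMAS AND PROOFS =====
theorem pvGo_eq_product (ps : String) :
    ∀ (L : List (String × List String)) (cmd : String),
      pvGo ps cmd L =
        (pvProduct (L.map (·.2))).map (fun combo =>
          (((L.map (·.1)).zip combo)).foldl (fun c kv => pvRepl ps c kv.1 kv.2) cmd) := by
  intro L
  induction L with
  | nil => intro cmd; simp [pvGo, pvProduct]
  | cons p rest ih =>
      intro cmd
      obtain ⟨k, vs⟩ := p
      simp only [pvGo, pvProduct, List.map_cons, List.map_flatMap, List.map_map]
      refine List.flatMap_congr ?_
      intro v _
      rw [ih]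
      simp [Function.comp, List.zip_cons_cons, List.foldl_cons]

-- ===== VERDICT (by name: the statement is the Claim_ definition above) =====
theorem expand_commands_py_spec : Claim_equal_expand_commands_py := by
  intro command sweep ps _ _
  unfold Spec_expand_commands_py expand_commands_py expand_commands_py_alt
  split
  · rfl
  · exact (pvGo_eq_product ps sweep command).symm
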